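-- pv_equiv track=rewrite | github.com/thewitch12/Homework | Apriori_algorithm/python/apriori.py | find_subset_nminus1
-- ===== SOURCE A (Python) =====
-- def find_subset_nminus1(super_set: list):
--     set_len = len(super_set)
--     tmp_subset = []
--     ret_subset = []
--     for i in range(set_len):
--         tmp_subset = []
--         for j in range(set_len):
--             if (1<<i) ^ (1<<j):
--                 tmp_subset.append(super_set[j])
--         ret_subset.append(set(tmp_subset))
--     return ret_subset
-- ===== SOURCE B (Python) =====
-- def find_subset_nminus1(super_set: list):
--     # One counting pass + one dedup replace the quadratic inner rescan:
--     # for index i the set is the full dedup (x seen before), the full dedup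
--     # minus x (x unique), or a rebuild only for the first of several copies.
--     counts = {}
--     for x in super_set:
--         counts[x] = counts.get(x, 0) + 1
--     full = list(dict.fromkeys(super_set))
--     ret = []
--     seen = set()
--     for i, x in enumerate(super_set):
--         if x in seen:
--             ret.append(set(full))
--         elif counts[x] == 1:
--             ret.append(set(full) - {x})
--         else:
--             ret.append(set(super_set[:i] + super_set[i + 1:]))
--         seen.add(x)
--     return ret
-- ===== Notes on version B (the rewrite author's own statement) =====
-- stated objective: faster
-- what changed: Replaces A's bitmask-tested inner j-loop and per-index set rebuild with one counting pass plus one dedup of the whole list; each index then gets the full dedup (element seen before), the full dedup minus the element (unique element), or a slice-based rebuild only for the first of several equal copies.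
import Mathlib
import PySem

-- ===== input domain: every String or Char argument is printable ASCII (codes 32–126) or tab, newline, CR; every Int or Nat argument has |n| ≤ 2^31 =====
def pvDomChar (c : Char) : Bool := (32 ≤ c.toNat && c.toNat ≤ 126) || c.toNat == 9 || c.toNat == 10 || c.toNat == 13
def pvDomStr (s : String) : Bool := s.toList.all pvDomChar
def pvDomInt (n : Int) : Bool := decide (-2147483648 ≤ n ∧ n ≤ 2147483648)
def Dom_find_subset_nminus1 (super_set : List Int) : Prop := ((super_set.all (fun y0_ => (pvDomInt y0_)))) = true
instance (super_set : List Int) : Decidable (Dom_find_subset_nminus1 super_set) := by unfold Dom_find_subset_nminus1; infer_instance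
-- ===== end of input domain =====

-- B replaces A's per-index inner rescan by one counting pass plus one dedup: each
-- result set is the full dedup, the full dedup minus a unique element, or (only for
-- the first of several equal copies) a rebuild from the two slices around i.

-- ===== PORT A =====
-- '(1<<i) ^ (1<<j)' is truthy iff the xor is nonzero; i and j are range elements,
-- hence non-negative, so '.toNat' on the shift amounts is exact.
def find_subset_nminus1 (super_set : List Int) : List (List Int) :=
  let set_len : Int := super_set.length
  let ret_subset : List (List Int) := []
  (PySem.List.pyRange 0 set_len 1).foldl (fun ret_subset i =>
    let tmp_subset : List Int :=
      (PySem.List.pyRange 0 set_len 1).foldl (fun tmp_subset j =>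
        if PySem.Int.bxor ((1 : Int) <<< i.toNat) ((1 : Int) <<< j.toNat) ≠ 0 then
          tmp_subset ++ [PySem.List.pyGetD super_set j 0]
        else tmp_subset) []
    ret_subset ++ [PySem.Set.ofList tmp_subset]) ret_subset

-- ===== PORT B =====
-- 'counts[x]' never raises (x was counted in the first loop), so it is ported as getD.
def find_subset_nminus1_alt (super_set : List Int) : List (List Int) :=
  let counts : PySem.Dict Int Int :=
    super_set.foldl (fun counts x => counts.insert x (counts.getD x 0 + 1)) PySem.Dict.empty
  let full : List Int := PySem.List.dedup super_set
  let fin :=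
    (PySem.List.enumerate super_set).foldl
      (fun (st : List (List Int) × PySem.Set Int) ix =>
        let i := ix.1
        let x := ix.2
        let r : List Int :=
          if PySem.Set.contains st.2 x then PySem.Set.ofList full
          else if counts.getD x 0 == 1 then
            PySem.Set.diff (PySem.Set.ofList full) (PySem.Set.ofList [x])
          else
            PySem.Set.ofList (PySem.List.slice super_set none (some i) ++
                              PySem.List.slice super_set (some (i + 1)) none)
        (st.1 ++ [r], PySem.Set.add st.2 x))
      ([], PySem.Set.empty)
  fin.1

-- ===== PRECONDITION & SPEC =====
def Spec_find_subset_nminus1 (super_set : List Int) (out : List (List Int)) : Prop := out = find_subset_nminus1_alt super_set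
instance (super_set : List Int) (out : List (List Int)) : Decidable (Spec_find_subset_nminus1 super_set out) := by unfold Spec_find_subset_nminus1; infer_instance

-- ===== CLAIM (what is proved, stated in full; the proofs are below) =====
def Claim_equal_find_subset_nminus1 : Prop := ∀ (super_set : List Int), Dom_find_subset_nminus1 super_set → Spec_find_subset_nminus1 super_set (find_subset_nminus1 super_set)

-- ===== LEMMAS AND PROOFS =====

-- the common specification both ports are reduced to: entry k is the dedup
-- (in first-occurrence order) of the input with position k removed
def pvSpecList (xs : List Int) : List (List Int) :=
  (List.range xs.length).map (fun k => PySem.Set.ofList (xs.take k ++ xs.drop (k + 1)))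

lemma bxor_shift_ne' (a b : Nat) :
    (PySem.Int.bxor ((1 : Int) <<< a) ((1 : Int) <<< b) ≠ 0) ↔ a ≠ b := by
  have h1 : ∀ n : Nat, (1 : Int) <<< n = ((2 ^ n : Nat) : Int) := by
    intro n; simp [Int.shiftLeft_eq]
  rw [h1, h1, PySem.Int.bxor_natCast]
  constructor
  · intro h hab; apply h; subst hab; simp
  · intro h hxor
    apply h
    have h2 : (2 ^ a : Nat) = 2 ^ b := by
      have := Nat.xor_eq_zero_iff.mp (by exact_mod_cast hxor)
      omega
    exact Nat.pow_right_injective (by norm_num) h2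


lemma bxor_shift_ne2 (a b : Nat) :
    (PySem.Int.bxor ((1:Int) <<< ((a : Nat) : Int)) ((1:Int) <<< ((b : Nat) : Int)) ≠ 0) ↔ a ≠ b := by
  rw [Int.shiftLeft_natCast_right, Int.shiftLeft_natCast_right]
  exact bxor_shift_ne' a b

lemma diff_singleton (l : List Int) (x : Int) :
    PySem.Set.diff l (PySem.Set.ofList [x]) = l.filter (fun y => decide (y ≠ x)) := by
  show l.filter (fun y => !(PySem.Set.ofList [x] : List Int).contains y) = _
  apply List.filter_congr
  intro y _
  by_cases h : y = x <;> simp [PySem.Set.ofList, PySem.Set.add, h]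

lemma map_pyGetD_prefix (xs : List Int) (k : Nat) (hk : k ≤ xs.length) :
    (PySem.List.pyRange 0 (k : Int) 1).map (fun j => PySem.List.pyGetD xs j 0) = xs.take k := by
  rw [PySem.List.pyRange_one]
  simp only [Int.sub_zero, Int.toNat_natCast, List.map_map]
  apply List.ext_getElem
  · simp [hk]
  · intro m h1 h2
    simp only [List.getElem_map, List.getElem_range, Function.comp_apply, List.getElem_take]
    have hm : m < k := by simpa using h1
    rw [show ((0 : Int) + (m : Int)) = ((m : Nat) : Int) by simp, PySem.List.pyGetD_natCast]
    exact List.getD_eq_getElem xs 0 (by omega)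

lemma inner_loop_eq (xs : List Int) (k : Nat) (hk : k < xs.length) :
    ((PySem.List.pyRange 0 (xs.length : Int) 1).filter
        (fun j => decide (j ≠ (k : Int)))).map (fun j => PySem.List.pyGetD xs j 0)
      = xs.take k ++ xs.drop (k + 1) := by
  rw [PySem.List.pyRange_one_append 0 (k : Int) (xs.length : Int) (by positivity) (by exact_mod_cast hk.le),
      PySem.List.pyRange_one_append (k : Int) ((k : Int) + 1) (xs.length : Int) (by omega) (by exact_mod_cast hk),
      PySem.List.pyRange_one_singleton, List.filter_append, List.filter_append]
  have h1 : List.filter (fun j => decide (j ≠ (k : Int))) (PySem.List.pyRange 0 (k : Int) 1)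
      = PySem.List.pyRange 0 (k : Int) 1 := by
    apply List.filter_eq_self.mpr
    intro a ha
    have := (PySem.List.mem_pyRange_one).mp ha
    simp only [decide_eq_true_eq]; omega
  have h2 : List.filter (fun j => decide (j ≠ (k : Int))) [(k : Int)] = [] := by simp
  have h3 : List.filter (fun j => decide (j ≠ (k : Int))) (PySem.List.pyRange ((k : Int) + 1) (xs.length : Int) 1)
      = PySem.List.pyRange ((k : Int) + 1) (xs.length : Int) 1 := by
    apply List.filter_eq_self.mpr
    intro a ha
    have := (PySem.List.mem_pyRange_one).mp ha
    simp only [decide_eq_true_eq]; omega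
  rw [h1, h2, h3, List.nil_append, List.map_append, map_pyGetD_prefix xs k hk.le]
  congr 1
  have h4 := PySem.List.map_pyGetD_pyRange' (a := ((k : Int) + 1)) (xs := xs) (d := 0) (by positivity)
  rw [h4]
  congr 1

lemma portA_eq_spec (xs : List Int) : find_subset_nminus1 xs = pvSpecList xs := by
  unfold find_subset_nminus1 pvSpecList
  simp only []
  rw [PySem.List.foldl_append_singleton_eq_map, List.nil_append]
  apply List.ext_getElem
  · simp [PySem.List.length_pyRange_one]
  · intro m h1 h2
    have hm : m < xs.length := by
      simpa [PySem.List.length_pyRange_one] using h1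
    simp only [List.getElem_map, List.getElem_range]
    rw [PySem.List.getElem_pyRange_one]
    congr 1
    refine Eq.trans (PySem.List.foldl_congr_mem _ _
      (fun tmp j => if j ≠ ((m : Nat) : Int) then tmp ++ [PySem.List.pyGetD xs j 0] else tmp)
      _ ?_) ?_
    · intro acc j hj
      have hj' := (PySem.List.mem_pyRange_one).mp hj
      by_cases h : j = ((m : Nat) : Int)
      · rw [if_neg (by subst h; simp [PySem.Int.bxor_self])]; simp [h]
      · rw [if_pos ((bxor_shift_ne2 _ _).mpr (by omega))]; simp [h]
    · rw [PySem.List.foldl_append_ite, List.nil_append]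
      exact inner_loop_eq xs m hm

lemma ofList_append (pre suf : List Int) :
    PySem.Set.ofList (pre ++ suf) = suf.foldl PySem.Set.add (PySem.Set.ofList pre) := by
  simp [PySem.Set.ofList_eq_foldl, List.foldl_append]

lemma foldl_add_of_nodup (l : List Int) : ∀ s : List Int, (s ++ l).Nodup →
    l.foldl PySem.Set.add s = s ++ l := by
  induction l with
  | nil => simp
  | cons x t ih =>
    intro s h
    have hx : x ∉ s := by
      intro hm
      exact (List.disjoint_of_nodup_append h) hm (by simp)
    rw [List.foldl_cons, PySem.Set.add_of_not_mem hx, ih (s ++ [x]) (by simpa using h)]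
    simp

lemma ofList_self_of_nodup (l : List Int) (h : l.Nodup) : PySem.Set.ofList l = l := by
  simpa [PySem.Set.ofList_eq_foldl] using foldl_add_of_nodup l [] (by simpa using h)

lemma filter_foldl_add (p : Int → Bool) (l : List Int) : ∀ s : List Int,
    (l.foldl PySem.Set.add s).filter p = (l.filter p).foldl PySem.Set.add (s.filter p) := by
  induction l with
  | nil => intro s; simp
  | cons x t ih =>
    intro s
    by_cases hm : x ∈ s
    · rw [List.foldl_cons, PySem.Set.add_of_mem hm]
      by_cases hp : p x
      · rw [List.filter_cons_of_pos hp, List.foldl_cons,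
            PySem.Set.add_of_mem (by simp [List.mem_filter, hm, hp]), ih]
      · rw [List.filter_cons_of_neg (by simpa using hp), ih]
    · rw [List.foldl_cons, PySem.Set.add_of_not_mem hm]
      by_cases hp : p x
      · rw [List.filter_cons_of_pos hp, List.foldl_cons,
            PySem.Set.add_of_not_mem (by simp [List.mem_filter, hm]), ih]
        simp [List.filter_append, hp]
      · rw [List.filter_cons_of_neg (by simpa using hp), ih]
        simp [List.filter_append, hp]

lemma filter_ofList (p : Int → Bool) (l : List Int) :
    (PySem.Set.ofList l).filter p = PySem.Set.ofList (l.filter p) := by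
  simpa [PySem.Set.ofList_eq_foldl] using filter_foldl_add p l []

lemma ofList_drop_dup (pre suf : List Int) (x : Int) (hx : x ∈ pre) :
    PySem.Set.ofList (pre ++ suf) = PySem.Set.ofList (pre ++ x :: suf) := by
  rw [ofList_append, ofList_append, List.foldl_cons,
      PySem.Set.add_of_mem (by simpa [PySem.Set.mem_ofList] using hx)]

lemma ofList_drop_unique (pre suf : List Int) (x : Int)
    (hpre : x ∉ pre) (hsuf : x ∉ suf) :
    PySem.Set.ofList (pre ++ suf) =
      PySem.Set.diff (PySem.Set.ofList (pre ++ x :: suf)) (PySem.Set.ofList [x]) := by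
  rw [diff_singleton, filter_ofList]
  congr 1
  rw [List.filter_append, List.filter_cons_of_neg (by simp),
      List.filter_eq_self.mpr (by
        intro a ha
        simp only [decide_eq_true_eq]
        intro h; exact hpre (h ▸ ha)),
      List.filter_eq_self.mpr (by
        intro a ha
        simp only [decide_eq_true_eq]
        intro h; exact hsuf (h ▸ ha))]

lemma b_step (pre suf : List Int) (x : Int) :
    (if PySem.Set.contains (PySem.Set.ofList pre) x then
        PySem.Set.ofList (PySem.List.dedup (pre ++ x :: suf))
      else if ((((pre ++ x :: suf).foldl (fun counts y => counts.insert y (counts.getD y 0 + 1))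
            PySem.Dict.empty : PySem.Dict Int Int)).getD x 0) == 1 then
        PySem.Set.diff (PySem.Set.ofList (PySem.List.dedup (pre ++ x :: suf))) (PySem.Set.ofList [x])
      else
        PySem.Set.ofList (PySem.List.slice (pre ++ x :: suf) none (some (pre.length : Int)) ++
          PySem.List.slice (pre ++ x :: suf) (some ((pre.length : Int) + 1)) none))
      = PySem.Set.ofList (pre ++ suf) := by
  have hded : PySem.Set.ofList (PySem.List.dedup (pre ++ x :: suf))
      = PySem.Set.ofList (pre ++ x :: suf) := by
    rw [PySem.List.dedup_eq_ofList, ofList_self_of_nodup _ (PySem.Set.nodup_ofList _)]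
  by_cases hmem : x ∈ pre
  · rw [if_pos (by rw [PySem.Set.contains_iff]; simpa [PySem.Set.mem_ofList] using hmem)]
    rw [hded, ← ofList_drop_dup pre suf x hmem]
  · rw [if_neg (by
        intro hc
        rw [PySem.Set.contains_iff] at hc
        exact hmem (by simpa [PySem.Set.mem_ofList] using hc))]
    have hcount : (((pre ++ x :: suf).foldl
          (fun counts y => counts.insert y (counts.getD y 0 + 1)) PySem.Dict.empty
          : PySem.Dict Int Int)).getD x 0
        = ((pre ++ x :: suf).count x : Int) := by
      have h := PySem.Dict.getD_foldl_insert_add_one (pre ++ x :: suf)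
        (PySem.Dict.empty (κ := Int) (ν := Int)) x
      simpa using h
    rw [hcount]
    by_cases hcnt : (pre ++ x :: suf).count x = 1
    · rw [if_pos (by simp [hcnt]), hded]
      have hsuf : x ∉ suf := by
        have hc : (pre ++ x :: suf).count x = pre.count x + (suf.count x + 1) := by
          simp [List.count_append]
        have hp : pre.count x = 0 := List.count_eq_zero.mpr hmem
        have : suf.count x = 0 := by omega
        exact List.count_eq_zero.mp this
      exact (ofList_drop_unique pre suf x hmem hsuf).symm
    · rw [if_neg (by
        simp only [beq_iff_eq]
        intro h
        exact hcnt (by exact_mod_cast h))]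
      congr 1
      rw [show ((pre.length : Int) + 1) = ((pre.length + 1 : Nat) : Int) by push_cast; ring]
      rw [PySem.List.slice_to_natCast, PySem.List.slice_from_natCast]
      congr 1
      · simp
      · rw [show pre ++ x :: suf = (pre ++ [x]) ++ suf by simp,
            show pre.length + 1 = ((pre ++ [x]).length) by simp, List.drop_left]

lemma b_fold (xs : List Int) : ∀ (suf pre : List Int) (out : List (List Int)),
    xs = pre ++ suf →
    ((PySem.List.enumerate suf (pre.length : Int)).foldl
      (fun (st : List (List Int) × PySem.Set Int) ix =>
        let i := ix.1
        let x := ix.2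
        let r : List Int :=
          if PySem.Set.contains st.2 x then PySem.Set.ofList (PySem.List.dedup xs)
          else if (((xs.foldl (fun counts y => counts.insert y (counts.getD y 0 + 1))
                PySem.Dict.empty : PySem.Dict Int Int)).getD x 0) == 1 then
            PySem.Set.diff (PySem.Set.ofList (PySem.List.dedup xs)) (PySem.Set.ofList [x])
          else
            PySem.Set.ofList (PySem.List.slice xs none (some i) ++
                              PySem.List.slice xs (some (i + 1)) none)
        (st.1 ++ [r], PySem.Set.add st.2 x))
      (out, PySem.Set.ofList pre)).1
    = out ++ (List.range suf.length).map
        (fun k => PySem.Set.ofList (xs.take (pre.length + k) ++ xs.drop (pre.length + k + 1))) := by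
  intro suf
  induction suf with
  | nil => intro pre out h; simp
  | cons x t ih =>
    intro pre out h
    rw [PySem.List.enumerate_cons, List.foldl_cons]
    simp only []
    have hseen : PySem.Set.add (PySem.Set.ofList pre) x = PySem.Set.ofList (pre ++ [x]) := by
      rw [ofList_append]; simp
    have hr : (if PySem.Set.contains (PySem.Set.ofList pre) x then PySem.Set.ofList (PySem.List.dedup xs)
          else if (((xs.foldl (fun counts y => counts.insert y (counts.getD y 0 + 1))
                PySem.Dict.empty : PySem.Dict Int Int)).getD x 0) == 1 then
            PySem.Set.diff (PySem.Set.ofList (PySem.List.dedup xs)) (PySem.Set.ofList [x])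
          else
            PySem.Set.ofList (PySem.List.slice xs none (some (pre.length : Int)) ++
                              PySem.List.slice xs (some ((pre.length : Int) + 1)) none))
        = PySem.Set.ofList (pre ++ t) := by
      rw [h]; exact b_step pre t x
    rw [hr, hseen]
    have hlen : ((pre.length : Int) + 1) = (((pre ++ [x]).length : Nat) : Int) := by simp
    rw [hlen, ih (pre ++ [x]) (out ++ [PySem.Set.ofList (pre ++ t)]) (by simp [h])]
    rw [List.append_assoc]
    congr 1
    rw [List.length_cons, List.range_succ_eq_map]
    simp only [List.map_cons, List.map_map, List.singleton_append]
    congr 1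
    · congr 1
      rw [h]
      congr 1
      · simp
      · rw [show pre ++ x :: t = (pre ++ [x]) ++ t by simp,
            show pre.length + 1 = ((pre ++ [x]).length) by simp, List.drop_left]
    · apply List.map_congr_left
      intro k _
      simp only [Function.comp_apply, List.length_append]
      congr 3 <;> (simp only [List.length_cons, List.length_nil]; omega)

lemma portB_eq_spec (xs : List Int) : find_subset_nminus1_alt xs = pvSpecList xs := by
  unfold find_subset_nminus1_alt pvSpecList
  simp only []
  have hb := b_fold xs xs [] [] (by simp)
  simpa using hb

-- ===== VERDICT (by name: the statement is the Claim_ definition above) =====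
theorem find_subset_nminus1_spec : Claim_equal_find_subset_nminus1 := by
  intro super_set _
  unfold Spec_find_subset_nminus1
  rw [portA_eq_spec, portB_eq_spec]
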